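-- pv_equiv track=rewrite | github.com/haokun-zhao/Collaborative-Disease-Detection | CDD/visualize_tsne.py | build_structured_ccsr_labels
-- ===== SOURCE A (Python) =====
-- def build_structured_ccsr_labels(ccsr_categories):
--     """
--     Build structured labels based only on 3-letter prefix, ignoring numeric suffix.
--     All categories with the same prefix will get the same label.
--
--     Args:
--         ccsr_categories: list of strings like ['CIR001', 'CIR002', 'RSP001', ...]
--     Returns:
--         category_to_label: dict mapping category to label (based on prefix)
--         label_to_category: dict mapping label to representative category (first one with that prefix)
--     """
--     # Step 1: Extract unique prefixes and sort them
--     unique_prefixes = sorted(set(cat[:3] for cat in ccsr_categories))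
--
--     # Step 2: Create prefix to label mapping
--     prefix_to_label = {prefix: idx + 1 for idx, prefix in enumerate(unique_prefixes)}
--
--     # Step 3: Map each category to its prefix's label
--     category_to_label = {}
--     label_to_category = {}
--
--     for cat in ccsr_categories:
--         prefix = cat[:3]
--         label = prefix_to_label[prefix]
--         category_to_label[cat] = label
--
--         # Store the first category with this prefix as the representative
--         if label not in label_to_category:
--             label_to_category[label] = prefix  # Store prefix as representative
--
--     return category_to_label, label_to_category
-- ===== SOURCE B (Python) =====
-- def build_structured_ccsr_labels(ccsr_categories):
--     # Rank-by-counting: no sorting anywhere. A prefix's label is the number of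
--     # distinct prefixes <= it (counted over the prefix set), which equals its
--     # 1-based position in the sorted distinct-prefix order.
--     seen = set()
--     first_order = []
--     for cat in ccsr_categories:
--         p = cat[:3]
--         if p not in seen:
--             seen.add(p)
--             first_order.append(p)
--
--     def rank(p):
--         return sum(1 for q in seen if q <= p)
--
--     category_to_label = {cat: rank(cat[:3]) for cat in ccsr_categories}
--     label_to_category = {rank(p): p for p in first_order}
--     return category_to_label, label_to_category
-- ===== Notes on version B (the rewrite author's own statement) =====
-- stated objective: alternative
-- what changed: B never sorts: it collects the distinct prefixes in one first-occurrence pass and labels a prefix by counting how many distinct prefixes compare <= to it, whereas A sorts the unique prefixes and labels by enumeration rank.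
import Mathlib
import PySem

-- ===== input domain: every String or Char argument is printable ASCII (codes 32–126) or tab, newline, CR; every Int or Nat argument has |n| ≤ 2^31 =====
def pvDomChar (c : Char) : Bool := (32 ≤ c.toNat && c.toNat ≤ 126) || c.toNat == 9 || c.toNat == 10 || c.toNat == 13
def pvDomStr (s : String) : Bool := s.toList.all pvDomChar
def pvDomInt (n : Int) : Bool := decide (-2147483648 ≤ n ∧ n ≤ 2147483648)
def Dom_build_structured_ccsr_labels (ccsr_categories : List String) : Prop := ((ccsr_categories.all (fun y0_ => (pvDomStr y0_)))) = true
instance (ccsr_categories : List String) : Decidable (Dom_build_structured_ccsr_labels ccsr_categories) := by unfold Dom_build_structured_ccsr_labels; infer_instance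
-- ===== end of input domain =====

-- B replaces A's sort-then-enumerate labelling by a sort-free rank-by-counting scheme
-- (label of a prefix = number of distinct prefixes <= it); objective: alternative algorithm.

-- cat[:3]
def pvPrefix (s : String) : String := PySem.Str.slice s none (some 3)

-- ===== PORT A =====
def build_structured_ccsr_labels (ccsr_categories : List String) : (List (String × Int)) × (List (Int × String)) :=
  let unique_prefixes : List String :=
    PySem.List.sorted (PySem.Set.ofList (ccsr_categories.map (fun cat => pvPrefix cat))) (fun x => x) false
  let prefix_to_label : PySem.Dict String Int :=
    (PySem.List.enumerate unique_prefixes 0).foldl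
      (fun d ip => d.insert ip.2 (ip.1 + 1)) PySem.Dict.empty
  let st :=
    ccsr_categories.foldl
      (fun (st : PySem.Dict String Int × PySem.Dict Int String) cat =>
        -- prefix_to_label[prefix]: the prefix is always a key, so the KeyError branch is
        -- unreachable; .get? + getD 0 is the total form of that lookup
        (st.1.insert cat ((prefix_to_label.get? (pvPrefix cat)).getD 0),
         if st.2.contains ((prefix_to_label.get? (pvPrefix cat)).getD 0) then st.2
         else st.2.insert ((prefix_to_label.get? (pvPrefix cat)).getD 0) (pvPrefix cat)))
      (PySem.Dict.empty, PySem.Dict.empty)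
  (st.1.items, st.2.items)

-- ===== PORT B =====
def build_structured_ccsr_labels_alt (ccsr_categories : List String) : (List (String × Int)) × (List (Int × String)) :=
  -- first pass: seen (a set) and first_order (prefixes in first-occurrence order)
  let st : PySem.Set String × List String :=
    ccsr_categories.foldl
      (fun st cat =>
        if PySem.Set.contains st.1 (pvPrefix cat) then st
        else (PySem.Set.add st.1 (pvPrefix cat), st.2 ++ [pvPrefix cat]))
      (PySem.Set.empty, [])
  -- rank(p) = sum(1 for q in seen if q <= p): a count over the set, order-independent
  let rank : String → Int := fun p => ((st.1.countP (fun q => decide (q ≤ p)) : Nat) : Int)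
  let category_to_label : PySem.Dict String Int :=
    ccsr_categories.foldl (fun d cat => d.insert cat (rank (pvPrefix cat))) PySem.Dict.empty
  let label_to_category : PySem.Dict Int String :=
    st.2.foldl (fun d p => d.insert (rank p) p) PySem.Dict.empty
  (category_to_label.items, label_to_category.items)

-- ===== PRECONDITION & SPEC =====
def Spec_build_structured_ccsr_labels (ccsr_categories : List String) (out : (List (String × Int)) × (List (Int × String))) : Prop := out = build_structured_ccsr_labels_alt ccsr_categories
instance (ccsr_categories : List String) (out : (List (String × Int)) × (List (Int × String))) : Decidable (Spec_build_structured_ccsr_labels ccsr_categories out) := by unfold Spec_build_structured_ccsr_labels; infer_instance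

-- ===== CLAIM (what is proved, stated in full; the proofs are below) =====
def Claim_equal_build_structured_ccsr_labels : Prop := ∀ (ccsr_categories : List String), Dom_build_structured_ccsr_labels ccsr_categories → Spec_build_structured_ccsr_labels ccsr_categories (build_structured_ccsr_labels ccsr_categories)

-- ===== LEMMAS AND PROOFS =====

-- a foldl updating a pair componentwise is the pair of componentwise foldls
theorem pv_foldl_pair {α β γ : Type} (l : List γ) (f : α → γ → α) (g : β → γ → β) (a : α) (b : β) :
    l.foldl (fun st x => (f st.1 x, g st.2 x)) (a, b) = (l.foldl f a, l.foldl g b) := by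
  induction l generalizing a b with
  | nil => rfl
  | cons x t ih => simpa using ih (f a x) (g b x)

-- B's first pass keeps seen and first_order equal (both are the ordered distinct prefixes)
theorem pv_seen_fold (cats : List String) (s : List String) :
    cats.foldl
      (fun (st : PySem.Set String × List String) cat =>
        if PySem.Set.contains st.1 (pvPrefix cat) then st
        else (PySem.Set.add st.1 (pvPrefix cat), st.2 ++ [pvPrefix cat]))
      (s, s)
    = ((cats.map (fun cat => pvPrefix cat)).foldl PySem.Set.add s,
       (cats.map (fun cat => pvPrefix cat)).foldl PySem.Set.add s) := by
  induction cats generalizing s with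
  | nil => rfl
  | cons c t ih =>
    simp only [List.foldl, List.map]
    by_cases h : PySem.Set.contains s (pvPrefix c) = true
    · have hm : pvPrefix c ∈ s := by simpa [PySem.Set.contains] using h
      rw [if_pos h, show PySem.Set.add s (pvPrefix c) = s by
          simp [PySem.Set.add, PySem.Set.contains, hm]]
      exact ih s
    · have hm : pvPrefix c ∉ s := by simpa [PySem.Set.contains] using h
      rw [if_neg h, show PySem.Set.add s (pvPrefix c) = s ++ [pvPrefix c] by
          simp [PySem.Set.add, PySem.Set.contains, hm]]
      exact ih (s ++ [pvPrefix c])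

theorem pv_dedup_concat_mem {α : Type} [BEq α] [LawfulBEq α] (l : List α) (x : α) (h : x ∈ l) :
    PySem.List.dedup (l ++ [x]) = PySem.List.dedup l := by
  simp only [PySem.List.dedup_eq_ofList, PySem.Set.ofList_eq_foldl, List.foldl_append]
  rw [← PySem.Set.ofList_eq_foldl]
  simp [PySem.Set.add, PySem.Set.contains, h]

theorem pv_dedup_concat_not_mem {α : Type} [BEq α] [LawfulBEq α] (l : List α) (x : α) (h : x ∉ l) :
    PySem.List.dedup (l ++ [x]) = PySem.List.dedup l ++ [x] := by
  simp only [PySem.List.dedup_eq_ofList, PySem.Set.ofList_eq_foldl, List.foldl_append]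
  rw [← PySem.Set.ofList_eq_foldl]
  simp [PySem.Set.add, PySem.Set.contains, h]

theorem pv_foldl_guard_insert_items {α κ ν : Type} [BEq α] [LawfulBEq α] [BEq κ] [LawfulBEq κ]
    (k : α → κ) (v : α → ν) (l : List α)
    (hinj : ∀ a ∈ l, ∀ b ∈ l, k a = k b → a = b) :
    (l.foldl (fun d x => if d.contains (k x) then d else d.insert (k x) (v x)) PySem.Dict.empty).items
      = (PySem.List.dedup l).map (fun x => (k x, v x)) := by
  induction l using List.reverseRecOn with
  | nil => simp [PySem.List.dedup, PySem.Dict.empty]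
  | append_singleton l x ih =>
    have hinj' : ∀ a ∈ l, ∀ b ∈ l, k a = k b → a = b := fun a ha b hb =>
      hinj a (List.mem_append_left _ ha) b (List.mem_append_left _ hb)
    rw [List.foldl_append]
    simp only [List.foldl]
    have hkeys : (l.foldl (fun d x => if d.contains (k x) then d else d.insert (k x) (v x)) PySem.Dict.empty).keys
        = (PySem.List.dedup l).map k := by
      simp only [PySem.Dict.keys, ih hinj', List.map_map]
      simp [Function.comp_def]
    have hmem : ((l.foldl (fun d x => if d.contains (k x) then d else d.insert (k x) (v x)) PySem.Dict.empty).contains (k x) = true) ↔ x ∈ l := by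
      rw [PySem.Dict.contains_iff_mem_keys, hkeys]
      constructor
      · intro hm
        obtain ⟨y, hy, hky⟩ := List.mem_map.mp hm
        have hyl : y ∈ l := (PySem.List.mem_dedup l y).mp hy
        have hyx : y = x := hinj y (List.mem_append_left _ hyl) x (List.mem_append_right _ (List.mem_singleton_self x)) hky
        rwa [← hyx]
      · intro hxl
        exact List.mem_map.mpr ⟨x, (PySem.List.mem_dedup l x).mpr hxl, rfl⟩
    by_cases hx : x ∈ l
    · rw [if_pos (hmem.mpr hx), ih hinj', pv_dedup_concat_mem l x hx]
    · rw [if_neg (fun hc => hx (hmem.mp hc))]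
      have hc : (l.foldl (fun d x => if d.contains (k x) then d else d.insert (k x) (v x)) PySem.Dict.empty).contains (k x) = false := by
        rw [Bool.eq_false_iff]
        exact fun hc => hx (hmem.mp hc)
      rw [PySem.Dict.items_insert_of_not_contains _ _ hc, ih hinj', pv_dedup_concat_not_mem l x hx]
      simp

theorem pv_nodup_sorted_set (ps : List String) :
    (PySem.List.sorted (PySem.Set.ofList ps) (fun x => x) false).Nodup :=
  (PySem.List.sorted_perm (PySem.Set.ofList ps) (fun x => x) false).nodup_iff.mpr
    (PySem.Set.nodup_ofList ps)

-- in a strictly increasing list, the count of elements ≤ the k-th element is k+1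
theorem pv_countP_le_strict (S : List String) (hS : S.Pairwise (· < ·)) (k : Nat) (hk : k < S.length) :
    S.countP (fun q => decide (q ≤ S[k])) = k + 1 := by
  induction S generalizing k with
  | nil => simp at hk
  | cons x t ih =>
    obtain ⟨hxt, ht⟩ := List.pairwise_cons.mp hS
    cases k with
    | zero =>
      have h0 : t.countP (fun q => decide (q ≤ x)) = 0 :=
        List.countP_eq_zero.mpr (fun q hq => by simpa using not_le.mpr (hxt q hq))
      show (x :: t).countP (fun q => decide (q ≤ x)) = 0 + 1
      rw [List.countP_cons, h0]
      simp
    | succ k =>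
      have hk' : k < t.length := by simpa using hk
      have hx : x ≤ t[k] := le_of_lt (hxt _ (List.getElem_mem hk'))
      have hg : (x :: t)[k + 1] = t[k] := by simp
      rw [hg, List.countP_cons, ih ht k hk']
      simp only [decide_eq_true_eq, if_pos hx]

theorem pv_lab_eq (ps : List String) (p : String) (hp : p ∈ ps) :
    (((PySem.List.enumerate (PySem.List.sorted (PySem.Set.ofList ps) (fun x => x) false) 0).foldl
        (fun d ip => d.insert ip.2 (ip.1 + 1)) PySem.Dict.empty).get? p).getD 0
      = (((PySem.List.index? (PySem.List.sorted (PySem.Set.ofList ps) (fun x => x) false) p).getD 0 : Nat) : Int) + 1 := by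
  set S := PySem.List.sorted (PySem.Set.ofList ps) (fun x => x) false with hS
  have hpS : p ∈ S := (PySem.List.mem_sorted _ _ _ p).mpr ((PySem.Set.mem_ofList ps p).mpr hp)
  have hnd : S.Nodup := pv_nodup_sorted_set ps
  obtain ⟨i, hi⟩ := Option.isSome_iff_exists.mp ((PySem.List.index?_isSome_iff S p).mpr hpS)
  obtain ⟨hk, hSi, -⟩ := PySem.List.getElem_of_index?_eq_some hi
  have hitems : ((PySem.List.enumerate S 0).foldl
      (fun d ip => d.insert ip.2 (ip.1 + 1)) PySem.Dict.empty).items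
      = (PySem.List.enumerate S 0).map (fun ip => (ip.2, ip.1 + 1)) := by
    have := PySem.Dict.items_foldl_insert_fresh (PySem.List.enumerate S 0)
      (fun ip => ip.2) (fun ip => ip.1 + 1) PySem.Dict.empty
      (by intro a _; simp [PySem.Dict.contains_empty])
      (by rw [PySem.List.map_snd_enumerate]; exact hnd)
    simpa using this
  have hmemit : (p, ((i : Nat) : Int) + 1) ∈ ((PySem.List.enumerate S 0).foldl
      (fun d ip => d.insert ip.2 (ip.1 + 1)) PySem.Dict.empty).items := by
    rw [hitems]
    refine List.mem_map.mpr ⟨((0 : Int) + (i : Nat), S[i]), ?_, by simp [hSi]⟩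
    exact (PySem.List.mem_enumerate_iff S 0 _).mpr ⟨i, hk, rfl⟩
  have hknd : ((PySem.List.enumerate S 0).foldl
      (fun d ip => d.insert ip.2 (ip.1 + 1)) PySem.Dict.empty).keys.Nodup := by
    simp only [PySem.Dict.keys, hitems, List.map_map]
    simpa [Function.comp_def, PySem.List.map_snd_enumerate] using hnd
  rw [PySem.Dict.get?_of_mem_items _ hmemit hknd]
  have hi' := hi
  rw [PySem.List.index?_eq_idxOf?] at hi'
  simp [hi']

-- proof-only abbreviations: A's sorted distinct-prefix list, prefix→label dict, the two label functions
def pvS (cats : List String) : List String :=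
  PySem.List.sorted (PySem.Set.ofList (cats.map (fun cat => pvPrefix cat))) (fun x => x) false
def pvPD (cats : List String) : PySem.Dict String Int :=
  (PySem.List.enumerate (pvS cats) 0).foldl (fun d ip => d.insert ip.2 (ip.1 + 1)) PySem.Dict.empty
def pvLabA (cats : List String) (p : String) : Int := ((pvPD cats).get? p).getD 0
def pvLabB (cats : List String) (p : String) : Int :=
  (((PySem.Set.ofList (cats.map (fun cat => pvPrefix cat))).countP (fun q => decide (q ≤ p)) : Nat) : Int)

-- B's count-based rank is the 1-based position in A's sorted distinct-prefix list
theorem pv_labB_eq_idx (cats : List String) (p : String) (hp : p ∈ cats.map (fun cat => pvPrefix cat)) :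
    pvLabB cats p = (((PySem.List.index? (pvS cats) p).getD 0 : Nat) : Int) + 1 := by
  set S := pvS cats with hS
  have hperm : S.Perm (PySem.Set.ofList (cats.map (fun cat => pvPrefix cat))) :=
    PySem.List.sorted_perm _ _ _
  have hpS : p ∈ S := (PySem.List.mem_sorted _ _ _ p).mpr ((PySem.Set.mem_ofList _ p).mpr hp)
  obtain ⟨i, hi⟩ := Option.isSome_iff_exists.mp ((PySem.List.index?_isSome_iff S p).mpr hpS)
  obtain ⟨hk, hSi, -⟩ := PySem.List.getElem_of_index?_eq_some hi
  have hstrict : S.Pairwise (· < ·) := PySem.List.sorted_ofList_pairwise_lt _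
  have hcount : S.countP (fun q => decide (q ≤ p)) = i + 1 := by
    rw [← hSi]; exact pv_countP_le_strict S hstrict i hk
  rw [pvLabB, ← hperm.countP_eq, hcount, hi]
  simp only [Option.getD_some]
  push_cast
  ring

theorem pv_labA_eq_labB (cats : List String) (p : String) (hp : p ∈ cats.map (fun cat => pvPrefix cat)) :
    pvLabA cats p = pvLabB cats p := by
  rw [pv_labB_eq_idx cats p hp]
  simpa only [pvLabA, pvPD, pvS] using pv_lab_eq (cats.map (fun cat => pvPrefix cat)) p hp

theorem pv_labA_injOn (cats : List String) (p q : String)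
    (hp : p ∈ cats.map (fun cat => pvPrefix cat)) (hq : q ∈ cats.map (fun cat => pvPrefix cat))
    (h : pvLabA cats p = pvLabA cats q) : p = q := by
  rw [pv_labA_eq_labB cats p hp, pv_labA_eq_labB cats q hq,
      pv_labB_eq_idx cats p hp, pv_labB_eq_idx cats q hq] at h
  set S := pvS cats with hS
  have hpS : p ∈ S := (PySem.List.mem_sorted _ _ _ p).mpr ((PySem.Set.mem_ofList _ p).mpr hp)
  have hqS : q ∈ S := (PySem.List.mem_sorted _ _ _ q).mpr ((PySem.Set.mem_ofList _ q).mpr hq)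
  obtain ⟨i, hi⟩ := Option.isSome_iff_exists.mp ((PySem.List.index?_isSome_iff S p).mpr hpS)
  obtain ⟨j, hj⟩ := Option.isSome_iff_exists.mp ((PySem.List.index?_isSome_iff S q).mpr hqS)
  obtain ⟨hik, hSi, -⟩ := PySem.List.getElem_of_index?_eq_some hi
  obtain ⟨hjk, hSj, -⟩ := PySem.List.getElem_of_index?_eq_some hj
  rw [hi, hj] at h
  have hij : i = j := by simpa using h
  subst hij
  rw [← hSi, ← hSj]

-- folds over the same list whose step functions agree on its members are equal
theorem pv_foldl_congr {α β : Type} (l : List α) (f g : β → α → β) (b : β)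
    (h : ∀ b' x, x ∈ l → f b' x = g b' x) : l.foldl f b = l.foldl g b := by
  induction l generalizing b with
  | nil => rfl
  | cons x t ih =>
    simp only [List.foldl]
    rw [h b x (List.mem_cons_self)]
    exact ih _ (fun b' y hy => h b' y (List.mem_cons_of_mem x hy))

theorem pv_goal (cats : List String) :
    ((cats.foldl (fun d cat => d.insert cat (pvLabA cats (pvPrefix cat))) PySem.Dict.empty).items,
     (cats.foldl (fun d cat =>
        if d.contains (pvLabA cats (pvPrefix cat)) then d
        else d.insert (pvLabA cats (pvPrefix cat)) (pvPrefix cat)) PySem.Dict.empty).items)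
    = ((cats.foldl (fun d cat => d.insert cat (pvLabB cats (pvPrefix cat))) PySem.Dict.empty).items,
       ((PySem.Set.ofList (cats.map (fun cat => pvPrefix cat))).foldl
          (fun d p => d.insert (pvLabB cats p) p) PySem.Dict.empty).items) := by
  rw [Prod.mk.injEq]
  refine ⟨?_, ?_⟩
  · rw [pv_foldl_congr cats _ (fun d cat => d.insert cat (pvLabB cats (pvPrefix cat))) _
        (fun d' c hc => by rw [pv_labA_eq_labB cats (pvPrefix c) (List.mem_map_of_mem hc)])]
  · rw [← List.foldl_map (f := fun cat => pvPrefix cat)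
        (g := fun d p => if d.contains (pvLabA cats p) then d else d.insert (pvLabA cats p) p)
        (l := cats) (init := PySem.Dict.empty)]
    rw [pv_foldl_guard_insert_items (fun p => pvLabA cats p) (fun p => p)
        (cats.map (fun cat => pvPrefix cat))
        (fun a ha b hb h => pv_labA_injOn cats a b ha hb h)]
    rw [PySem.Dict.items_foldl_insert_fresh (PySem.Set.ofList (cats.map (fun cat => pvPrefix cat)))
        (fun p => pvLabB cats p) (fun p => p) PySem.Dict.empty
        (fun a _ => PySem.Dict.contains_empty _)
        (List.Nodup.map_on
          (fun x hx y hy h => by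
            have hx' := (PySem.Set.mem_ofList _ x).mp hx
            have hy' := (PySem.Set.mem_ofList _ y).mp hy
            exact pv_labA_injOn cats x y hx' hy'
              (by rw [pv_labA_eq_labB cats x hx', pv_labA_eq_labB cats y hy']; exact h))
          (PySem.Set.nodup_ofList _))]
    simp only [PySem.List.dedup_eq_ofList]
    apply List.map_congr_left
    intro p hp
    rw [pv_labA_eq_labB cats p ((PySem.Set.mem_ofList _ p).mp hp)]

-- ===== VERDICT =====
theorem build_structured_ccsr_labels_spec : Claim_equal_build_structured_ccsr_labels := by
  intro cats _
  show build_structured_ccsr_labels cats = build_structured_ccsr_labels_alt cats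
  rw [show build_structured_ccsr_labels cats
        = ((cats.foldl (fun st cat =>
              (st.1.insert cat (pvLabA cats (pvPrefix cat)),
               if st.2.contains (pvLabA cats (pvPrefix cat)) then st.2
               else st.2.insert (pvLabA cats (pvPrefix cat)) (pvPrefix cat)))
            (PySem.Dict.empty, PySem.Dict.empty)).1.items,
           (cats.foldl (fun st cat =>
              (st.1.insert cat (pvLabA cats (pvPrefix cat)),
               if st.2.contains (pvLabA cats (pvPrefix cat)) then st.2
               else st.2.insert (pvLabA cats (pvPrefix cat)) (pvPrefix cat)))
            (PySem.Dict.empty, PySem.Dict.empty)).2.items) from rfl,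
      pv_foldl_pair cats
        (fun (d : PySem.Dict String Int) cat => d.insert cat (pvLabA cats (pvPrefix cat)))
        (fun (d : PySem.Dict Int String) cat =>
          if d.contains (pvLabA cats (pvPrefix cat)) then d
          else d.insert (pvLabA cats (pvPrefix cat)) (pvPrefix cat))
        PySem.Dict.empty PySem.Dict.empty]
  rw [show build_structured_ccsr_labels_alt cats
        = ((cats.foldl (fun d cat => d.insert cat (pvLabB cats (pvPrefix cat))) PySem.Dict.empty).items,
           ((PySem.Set.ofList (cats.map (fun cat => pvPrefix cat))).foldl
              (fun d p => d.insert (pvLabB cats p) p) PySem.Dict.empty).items) from by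
        unfold build_structured_ccsr_labels_alt
        rw [show (PySem.Set.empty : PySem.Set String) = ([] : List String) from rfl,
            pv_seen_fold cats []]
        simp only [← PySem.Set.ofList_eq_foldl]
        rfl]
  exact pv_goal cats
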